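-- pv_equiv track=rewrite | github.com/pmkiedrowicz/python_beginning_scripts | odd_index_list.py | pick_odd_index
-- ===== SOURCE A (Python) =====
-- def pick_odd_index(ls):
--     i = 1
--     new_ls = []
--     while i < len(ls):
--         if ls[i] % 2 == 0:
--             new_ls.append(ls[i])
--         i += 2
--     return new_ls
-- ===== SOURCE B (Python) =====
-- def pick_odd_index(ls):
--     out = []
--     it = iter(ls)
--     for _ in it:               # consume the even-index element
--         b = next(it, None)     # its odd-index partner, if any
--         if b is None:
--             break
--         if b % 2 == 0:
--             out.append(b)
--     return out
-- ===== Notes on version B (the rewrite author's own statement) =====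
-- stated objective: alternative
-- what changed: Replaces A's index-stepping while loop (i starting at 1, step 2, subscript access ls[i]) by a pair-consuming iterator walk: advance an iterator two elements per round with no indexing at all, keeping the second element of each pair when it is even.
import Mathlib
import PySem

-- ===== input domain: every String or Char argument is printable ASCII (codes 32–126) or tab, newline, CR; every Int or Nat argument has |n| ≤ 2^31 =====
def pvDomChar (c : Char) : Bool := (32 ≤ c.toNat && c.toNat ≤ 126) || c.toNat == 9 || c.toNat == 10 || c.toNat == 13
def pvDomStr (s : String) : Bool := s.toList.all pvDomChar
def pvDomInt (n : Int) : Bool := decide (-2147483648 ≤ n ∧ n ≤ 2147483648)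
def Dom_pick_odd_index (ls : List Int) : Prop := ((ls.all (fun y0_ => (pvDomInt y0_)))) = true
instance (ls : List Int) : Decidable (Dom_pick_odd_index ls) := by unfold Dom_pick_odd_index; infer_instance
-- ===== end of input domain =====

-- B replaces A's index-stepping while loop by a pair-consuming iterator walk with no subscripting (alternative decomposition, same O(n) cost).


-- ===== PORT A =====
-- the while loop: while i < len(ls): if ls[i] % 2 == 0: new_ls.append(ls[i]); i += 2
def pick_odd_index_go (ls : List Int) (i : Nat) (new_ls : List Int) : List Int :=
  if h : i < ls.length then
    pick_odd_index_go ls (i + 2)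
      (if PySem.Int.mod ls[i] 2 = 0 then new_ls ++ [ls[i]] else new_ls)
  else new_ls
termination_by ls.length - i

def pick_odd_index (ls : List Int) : List Int :=
  pick_odd_index_go ls 1 []

-- ===== PORT B =====
-- Source B walks an iterator two elements per round: the remaining list is the iterator's
-- unconsumed suffix; one `for`-round consumes the head (ignored) and its partner b.
def pick_odd_index_alt_go (out : List Int) : List Int → List Int
  | [] => out                    -- for-loop ends: iterator exhausted
  | [_] => out                   -- next(it, None) is None: break
  | _ :: b :: rest =>
      pick_odd_index_alt_go (if PySem.Int.mod b 2 = 0 then out ++ [b] else out) rest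

def pick_odd_index_alt (ls : List Int) : List Int :=
  pick_odd_index_alt_go [] ls

-- ===== PRECONDITION & SPEC =====
def Spec_pick_odd_index (ls : List Int) (out : List Int) : Prop := out = pick_odd_index_alt ls
instance (ls : List Int) (out : List Int) : Decidable (Spec_pick_odd_index ls out) := by unfold Spec_pick_odd_index; infer_instance

-- ===== CLAIM (what is proved, stated in full; the proofs are below) =====
def Claim_equal_pick_odd_index : Prop := ∀ (ls : List Int), Dom_pick_odd_index ls → Spec_pick_odd_index ls (pick_odd_index ls)

-- ===== LEMMAS AND PROOFS =====

/-- A's loop from index i ≥ 1 computes exactly B's pair-walk over the suffix `ls.drop (i-1)`. -/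
lemma go_eq (ls : List Int) : ∀ (n i : Nat), ls.length - i ≤ n → 1 ≤ i → ∀ (acc : List Int),
    pick_odd_index_go ls i acc = pick_odd_index_alt_go acc (ls.drop (i - 1)) := by
  intro n
  induction n with
  | zero =>
    intro i h hi acc
    have hni : ¬ i < ls.length := by omega
    rw [pick_odd_index_go]
    simp only [hni, dif_neg, not_false_iff]
    rcases hd : ls.drop (i - 1) with _ | ⟨a, _ | ⟨b, t⟩⟩
    · rfl
    · rfl
    · exfalso
      have := congrArg List.length hd
      simp at this
      omega
  | succ n ih =>
    intro i h hi acc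
    rw [pick_odd_index_go]
    by_cases hlt : i < ls.length
    · simp only [hlt, dif_pos]
      rw [ih (i + 2) (by omega) (by omega)]
      have hd1 : ls.drop (i - 1) = ls[i - 1] :: ls[i] :: ls.drop (i + 1) := by
        rw [List.drop_eq_getElem_cons (by omega)]
        congr 1
        · rw [List.drop_eq_getElem_cons (by omega)]
          congr 2 <;> omega
      have hd2 : ls.drop (i + 2 - 1) = ls.drop (i + 1) := by congr 1
      rw [hd1, hd2, pick_odd_index_alt_go]
    · simp only [hlt, dif_neg, not_false_iff]
      rcases hd : ls.drop (i - 1) with _ | ⟨a, _ | ⟨b, t⟩⟩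
      · rfl
      · rfl
      · exfalso
        have := congrArg List.length hd
        simp at this
        omega

-- ===== VERDICT (by name: the statement is the Claim_ definition above) =====
theorem pick_odd_index_spec : Claim_equal_pick_odd_index := by
  intro ls _
  unfold Spec_pick_odd_index pick_odd_index pick_odd_index_alt
  rw [go_eq ls (ls.length - 1) 1 (by omega) (le_refl 1) []]
  rfl
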